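-- pv_equiv track=rewrite | github.com/ThreatByte/ISSCTF2024 | CRYPTOGRAPHY/06- Rotveiller/solve.py | decrypt_string
-- ===== SOURCE A (Python) =====
-- def rotate_char(char, shift):
--     if '!' <= char <= '~':
--         return chr(((ord(char) - ord('!') + shift) % 94) + ord('!'))
--     else:
--         return char
--
-- def decrypt_string(encrypted_string):
--     decrypted_string = ""
--     for i in range(len(encrypted_string)):
--         if i % 2 == 0:
--             decrypted_char = rotate_char(encrypted_string[i], -1)
--         else:
--             decrypted_char = rotate_char(encrypted_string[i], -47)
--         decrypted_string += decrypted_char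
--     return decrypted_string
-- ===== SOURCE B (Python) =====
-- # Table-driven parity-split decryption: precomputed lookup tables replace the
-- # per-character modular arithmetic, and the index loop is replaced by slicing
-- # the string into even/odd positions, translating each half, and interleaving.
--
-- _T1 = {chr(c): chr((c - 33 - 1) % 94 + 33) for c in range(33, 127)}
-- _T47 = {chr(c): chr((c - 33 - 47) % 94 + 33) for c in range(33, 127)}
--
--
-- def decrypt_string(encrypted_string):
--     even = [_T1.get(c, c) for c in encrypted_string[::2]]
--     odd = [_T47.get(c, c) for c in encrypted_string[1::2]]
--     out = []
--     for e, o in zip(even, odd):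
--         out.append(e)
--         out.append(o)
--     if len(even) > len(odd):
--         out.append(even[-1])
--     return "".join(out)
-- ===== Notes on version B (the rewrite author's own statement) =====
-- stated objective: faster
-- what changed: Replaces the per-index loop with modular arithmetic on each character by two precomputed 94-entry translation tables applied to the even/odd parity slices of the string, which are then re-interleaved.
import Mathlib
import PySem

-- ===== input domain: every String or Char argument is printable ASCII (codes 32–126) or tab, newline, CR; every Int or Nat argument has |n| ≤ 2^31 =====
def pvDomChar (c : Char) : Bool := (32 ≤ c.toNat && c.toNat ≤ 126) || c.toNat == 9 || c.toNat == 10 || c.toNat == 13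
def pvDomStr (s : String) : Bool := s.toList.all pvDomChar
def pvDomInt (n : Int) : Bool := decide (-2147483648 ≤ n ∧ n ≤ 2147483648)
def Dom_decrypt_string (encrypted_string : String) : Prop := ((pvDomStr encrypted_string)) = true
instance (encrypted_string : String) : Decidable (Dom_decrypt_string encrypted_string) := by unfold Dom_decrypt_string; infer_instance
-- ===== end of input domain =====

-- B replaces A's per-index modular arithmetic by two precomputed translation tables
-- applied to the even/odd parity slices, then re-interleaves the two halves (objective: faster, constant factor).

-- ===== PORT A =====
-- ord('!') = 33, ord('~') = 126
def rotate_char (char : Char) (shift : Int) : Char :=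
  if '!' ≤ char ∧ char ≤ '~' then
    Char.ofNat (PySem.Int.mod ((char.toNat : Int) - 33 + shift) 94 + 33).toNat
  else char

def decrypt_string (encrypted_string : String) : String :=
  -- 'for i in range(len(s)): … s[i] …' ported as a fold over enumerate(s)
  (PySem.List.enumerate encrypted_string.toList 0).foldl
    (fun acc p =>
      let decrypted_char :=
        if PySem.Int.mod p.1 2 == 0 then rotate_char p.2 (-1) else rotate_char p.2 (-47)
      acc ++ String.ofList [decrypted_char])
    ""

-- ===== PORT B =====
-- {chr(c): chr((c - 33 + shift) % 94 + 33) for c in range(33, 127)}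
def pvTable (shift : Int) : PySem.Dict Char Char :=
  (PySem.List.pyRange 33 127 1).foldl
    (fun d k => d.insert (Char.ofNat k.toNat)
      (Char.ofNat (PySem.Int.mod (k - 33 + shift) 94 + 33).toNat))
    PySem.Dict.empty

def decrypt_string_alt (encrypted_string : String) : String :=
  let even := ((PySem.List.slice? encrypted_string.toList none none 2).getD []).map
      (fun c => (pvTable (-1)).getD c c)
  let odd := ((PySem.List.slice? encrypted_string.toList (some 1) none 2).getD []).map
      (fun c => (pvTable (-47)).getD c c)
  let out := (even.zip odd).foldl (fun acc p => acc ++ [p.1, p.2]) ([] : List Char)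
  let out := if even.length > odd.length then
      out ++ (match PySem.List.pyGet? even (-1) with | some c => [c] | none => [])
    else out
  String.ofList out

-- ===== PRECONDITION & SPEC =====
def Spec_decrypt_string (encrypted_string : String) (out : String) : Prop := out = decrypt_string_alt encrypted_string
instance (encrypted_string : String) (out : String) : Decidable (Spec_decrypt_string encrypted_string out) := by unfold Spec_decrypt_string; infer_instance

-- ===== CLAIM (what is proved, stated in full; the proofs are below) =====
def Claim_equal_decrypt_string : Prop := ∀ (encrypted_string : String), Dom_decrypt_string encrypted_string → Spec_decrypt_string encrypted_string (decrypt_string encrypted_string)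

-- ===== LEMMAS AND PROOFS =====

-- the common value: A's per-pair decryption, written structurally
def pvMix : List Char → List Char
  | [] => []
  | [x] => [rotate_char x (-1)]
  | x :: y :: t => rotate_char x (-1) :: rotate_char y (-47) :: pvMix t

-- parity split: (elements at even positions, elements at odd positions)
def pvSplit : List Char → List Char × List Char
  | [] => ([], [])
  | x :: t => (x :: (pvSplit t).2, (pvSplit t).1)

lemma pvSplit_cons_cons (x y : Char) (t : List Char) :
    pvSplit (x :: y :: t) = (x :: (pvSplit t).1, y :: (pvSplit t).2) := by
  simp [pvSplit]

-- the even slice via range/filterMap, as slice? computes it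
lemma pvRangeFilterMap (l : List Char) :
    (List.range ((l.length + 1) / 2)).filterMap (fun k => l[2 * k]?) = (pvSplit l).1 := by
  induction l using pvMix.induct with
  | case1 => simp [pvSplit]
  | case2 x => simp [pvSplit]
  | case3 x y t ih =>
    have hlen : (((x :: y :: t) : List Char).length + 1) / 2 = ((t.length + 1) / 2) + 1 := by
      simp; omega
    rw [hlen, List.range_succ_eq_map, List.filterMap_cons, List.filterMap_map]
    simp only [pvSplit_cons_cons]
    have : ∀ k : Nat, (x :: y :: t)[2 * (k + 1)]? = t[2 * k]? := by
      intro k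
      have h2 : 2 * (k + 1) = 2 * k + 1 + 1 := by omega
      rw [h2]
      simp
    simp only [Function.comp_def, this]
    simp [ih]

lemma pvSlice_even (l : List Char) :
    PySem.List.slice? l none none 2 = some (pvSplit l).1 := by
  rw [← pvRangeFilterMap]
  simp only [PySem.List.slice?, PySem.List.sliceIndices]
  norm_num
  have hc : (if 0 < l.length then (((l.length : Int) + 2 - 1) / 2).toNat else 0) = (l.length + 1) / 2 := by
    split <;> omega
  have hf : ∀ x : Nat, (2 * (x : Int)).toNat = 2 * x := by intro x; omega
  simp only [hc, hf]

lemma pvSlice_odd (l : List Char) :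
    PySem.List.slice? l (some 1) none 2 = some (pvSplit l).2 := by
  match l with
  | [] => decide
  | x :: t =>
    have h2 : (pvSplit (x :: t)).2 = (pvSplit t).1 := by simp [pvSplit]
    rw [h2, ← pvRangeFilterMap]
    simp only [PySem.List.slice?, PySem.List.sliceIndices]
    norm_num
    have hc : (if 0 < t.length then (((t.length : Int) + 2 - 1) / 2).toNat else 0) = (t.length + 1) / 2 := by
      split <;> omega
    have hf : ∀ k : Nat, (x :: t)[(1 + 2 * (k : Int)).toNat]? = t[2 * k]? := by
      intro k
      have h1 : (1 + 2 * (k : Int)).toNat = 2 * k + 1 := by omega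
      rw [h1]
      simp
    simp only [hc, hf]

lemma pvCharOfNat_toNat (m : Nat) (h : m < 55296) : (Char.ofNat m).toNat = m := by
  unfold Char.ofNat
  rw [dif_pos (Or.inl h)]
  rfl

lemma pvCharEq (c : Char) (m : Nat) (h : m < 55296) : c = Char.ofNat m ↔ c.toNat = m := by
  constructor
  · intro h1; rw [h1, pvCharOfNat_toNat m h]
  · intro h1; rw [← h1, Char.ofNat_toNat]

lemma pvCharLe (c : Char) : ('!' ≤ c ∧ c ≤ '~') ↔ (33 ≤ c.toNat ∧ c.toNat ≤ 126) := by
  simp only [Char.le_def, UInt32.le_iff_toNat_le]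
  exact Iff.rfl

lemma pvTable_aux (g : Int → Char) (n : Nat) (hn : 33 + n ≤ 55296) :
    ∀ (d : PySem.Dict Char Char) (c : Char),
    ((PySem.List.pyRange 33 (33 + (n : Int)) 1).foldl
        (fun d k => d.insert (Char.ofNat k.toNat) (g k)) d).getD c c
      = if 33 ≤ c.toNat ∧ c.toNat < 33 + n then g ((c.toNat : Nat) : Int) else d.getD c c := by
  induction n with
  | zero =>
    intro d c
    rw [PySem.List.pyRange_one_eq_nil (by omega)]
    have h0 : ¬ (33 ≤ c.toNat ∧ c.toNat < 33 + 0) := by omega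
    simp [h0]
  | succ n ih =>
    intro d c
    have hcast : (33 + ((n + 1 : Nat) : Int)) = (33 + (n : Int)) + 1 := by push_cast; ring
    rw [hcast, PySem.List.pyRange_one_succ_right (by omega), List.foldl_append]
    simp only [List.foldl_cons, List.foldl_nil]
    rw [PySem.Dict.getD_insert]
    have hkey : ((33 + (n : Int)).toNat) = 33 + n := by omega
    rw [hkey]
    by_cases hc : c = Char.ofNat (33 + n)
    · have hct : c.toNat = 33 + n := (pvCharEq c (33 + n) (by omega)).mp hc
      rw [if_pos hc, if_pos (by omega)]
      congr 1
      omega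
    · rw [if_neg hc, ih (by omega)]
      have hct : c.toNat ≠ 33 + n := fun h => hc ((pvCharEq c (33 + n) (by omega)).mpr h)
      by_cases h1 : 33 ≤ c.toNat ∧ c.toNat < 33 + n
      · rw [if_pos h1, if_pos (by omega)]
      · rw [if_neg h1, if_neg (by omega)]

-- translation table lookup = rotate_char
lemma pvTable_getD (shift : Int) (c : Char) :
    (pvTable shift).getD c c = rotate_char c shift := by
  unfold pvTable rotate_char
  have h127 : (127 : Int) = 33 + ((94 : Nat) : Int) := by norm_num
  rw [h127, pvTable_aux _ 94 (by omega)]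
  by_cases h : 33 ≤ c.toNat ∧ c.toNat ≤ 126
  · rw [if_pos (by omega), if_pos ((pvCharLe c).mpr h)]
  · rw [if_neg (by omega), if_neg (fun hh => h ((pvCharLe c).mp hh)), PySem.Dict.getD_empty]

-- interleaving, as the zip fold computes it
def pvIlv : List Char → List Char → List Char
  | [], _ => []
  | _ :: _, [] => []
  | x :: e, y :: o => x :: y :: pvIlv e o

lemma pvZipFold (e : List Char) : ∀ (o acc : List Char),
    (e.zip o).foldl (fun acc p => acc ++ [p.1, p.2]) acc = acc ++ pvIlv e o := by
  induction e with
  | nil => intro o acc; simp [pvIlv]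
  | cons x e ih =>
    intro o acc
    cases o with
    | nil => simp [pvIlv]
    | cons y o => simp [pvIlv, ih]

-- B's merge of the two translated halves (B's body after the two slices)
def pvMerge (e o : List Char) : List Char :=
  let out := (e.zip o).foldl (fun acc p => acc ++ [p.1, p.2]) []
  if e.length > o.length then
    out ++ (match PySem.List.pyGet? e (-1) with | some c => [c] | none => [])
  else out

lemma pvMerge_mix : ∀ l : List Char,
    pvMerge ((pvSplit l).1.map (fun c => rotate_char c (-1)))
        ((pvSplit l).2.map (fun c => rotate_char c (-47))) = pvMix l := by
  intro l
  induction l using pvMix.induct with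
  | case1 => simp [pvSplit, pvMerge, pvMix]
  | case2 x => simp [pvSplit, pvMerge, pvMix, PySem.List.pyGet?_neg_one]
  | case3 x y t ih =>
    rw [pvSplit_cons_cons]
    unfold pvMerge at ih ⊢
    simp only [List.map_cons, List.zip_cons_cons, List.foldl_cons, List.nil_append,
      List.length_cons, pvZipFold, PySem.List.pyGet?_neg_one] at ih ⊢
    by_cases h : (pvSplit t).2.length < (pvSplit t).1.length
    · have hE : ((pvSplit t).1.map (fun c => rotate_char c (-1))) ≠ [] := by
        intro hnil
        rw [List.map_eq_nil_iff] at hnil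
        simp [hnil] at h
      rw [if_pos (by simpa using h)] at ih
      rw [if_pos (by simp only [List.length_map]; omega)]
      obtain ⟨e0, E', hE'⟩ := List.exists_cons_of_ne_nil hE
      rw [hE'] at ih ⊢
      simp only [List.getLast?_cons_cons]
      simp [pvMix, ← ih]
    · rw [if_neg (by simpa using h)] at ih
      rw [if_neg (by simp only [List.length_map]; omega)]
      simp [pvMix, ← ih]

-- B's computation equals pvMix
lemma pvB_eq_mix (l : List Char) :
    decrypt_string_alt (String.ofList l) = String.ofList (pvMix l) := by
  unfold decrypt_string_alt
  have hf1 : (fun c => (pvTable (-1)).getD c c) = (fun c => rotate_char c (-1)) :=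
    funext (fun c => pvTable_getD (-1) c)
  have hf47 : (fun c => (pvTable (-47)).getD c c) = (fun c => rotate_char c (-47)) :=
    funext (fun c => pvTable_getD (-47) c)
  simp only [String.toList_ofList, pvSlice_even, pvSlice_odd, Option.getD_some, hf1, hf47]
  refine congrArg String.ofList ?_
  have hm := pvMerge_mix l
  unfold pvMerge at hm
  simpa using hm

lemma pvA_core : ∀ (l : List Char) (i : Int), 0 ≤ i → PySem.Int.mod i 2 = 0 →
    ∀ (acc : List Char),
    (PySem.List.enumerate l i).foldl
        (fun acc p =>
          let decrypted_char :=
            if PySem.Int.mod p.1 2 == 0 then rotate_char p.2 (-1) else rotate_char p.2 (-47)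
          acc ++ String.ofList [decrypted_char])
        (String.ofList acc) = String.ofList (acc ++ pvMix l) := by
  intro l
  induction l using pvMix.induct with
  | case1 => intro i _ _ acc; simp [PySem.List.enumerate, pvMix]
  | case2 x =>
    intro i hi hmod acc
    have h0 : (PySem.Int.mod i 2 == 0) = true := by rw [hmod]; rfl
    simp only [PySem.List.enumerate_cons, PySem.List.enumerate_nil, List.foldl_cons,
      List.foldl_nil, h0]
    simp [pvMix, String.ofList_append]
  | case3 x y t ih =>
    intro i hi hmod acc
    have h0 : (PySem.Int.mod i 2 == 0) = true := by rw [hmod]; rfl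
    have hmod' : i % 2 = 0 := by
      rw [PySem.Int.mod, Int.fmod_eq_emod_of_nonneg _ (by norm_num)] at hmod
      exact hmod
    have h1 : (PySem.Int.mod (i + 1) 2 == 0) = false := by
      rw [PySem.Int.mod, Int.fmod_eq_emod_of_nonneg _ (by norm_num)]
      simp only [beq_eq_false_iff_ne, ne_eq]
      omega
    simp only [PySem.List.enumerate_cons, List.foldl_cons, h0, h1]
    have hmod2 : PySem.Int.mod (i + 1 + 1) 2 = 0 := by
      rw [PySem.Int.mod, Int.fmod_eq_emod_of_nonneg _ (by norm_num)]
      omega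
    simp only [if_neg (by simp : ¬false = true)]
    rw [← String.ofList_append, ← String.ofList_append, ih (i + 1 + 1) (by omega) hmod2]
    simp [pvMix]

-- A's fold equals pvMix
lemma pvA_eq_mix (l : List Char) :
    decrypt_string (String.ofList l) = String.ofList (pvMix l) := by
  unfold decrypt_string
  have h := pvA_core l 0 (by norm_num) (by decide) []
  simpa using h

-- ===== VERDICT =====
theorem decrypt_string_spec : Claim_equal_decrypt_string := by
  intro s _
  unfold Spec_decrypt_string
  have h : String.ofList s.toList = s := String.ofList_toList
  rw [← h, pvA_eq_mix, pvB_eq_mix]
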